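-- pv_equiv track=rewrite | github.com/matt-deetz/elevator_problem | elevator_problem.py | elevator_problem
-- ===== SOURCE A (Python) =====
-- from bisect import bisect_right
--
-- def elevator_problem(start, floors):
--     top = max(floors)
--     bottom = min(floors)
--     unique_floors = sorted(set(f for f in floors if f != start))
--     visited = []
--     x = bisect_right(unique_floors, start)
--
--
--     if abs(start - bottom) < abs(top - start):
--         cost = (abs(start - bottom) + abs(top - bottom)) * 10
--         visited = unique_floors[:x][::-1] + unique_floors[x:]
--     else:
--         cost = (abs(top - start) + abs(top - bottom)) * 10
--         visited = unique_floors[x:] + unique_floors[:x][::-1]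
--
--     return (visited, cost)
-- ===== SOURCE B (Python) =====
-- def _asc(xs):
--     # recursive 3-way quicksort with built-in dedup: ascending distinct values of xs
--     if not xs:
--         return []
--     p = xs[len(xs) // 2]
--     return _asc([x for x in xs if x < p]) + [p] + _asc([x for x in xs if x > p])
--
--
-- def _desc(xs):
--     # same divide-and-conquer, emitting the distinct values in descending order
--     if not xs:
--         return []
--     p = xs[len(xs) // 2]
--     return _desc([x for x in xs if x > p]) + [p] + _desc([x for x in xs if x < p])
--
--
-- def elevator_problem(start, floors):
--     top = max(floors)
--     bottom = min(floors)
--     down = _desc([f for f in floors if f < start])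
--     up = _asc([f for f in floors if f > start])
--     if abs(start - bottom) < abs(top - start):
--         return (down + up, (abs(start - bottom) + (top - bottom)) * 10)
--     return (up + down, (abs(top - start) + (top - bottom)) * 10)
-- ===== Notes on version B (the rewrite author's own statement) =====
-- stated objective: alternative
-- what changed: Replaces library sorted(set(...)) plus bisect_right split/slice/reverse assembly with a hand-written recursive 3-way quicksort that deduplicates while it sorts, run once descending on the floors below start and once ascending on those above, so set(), bisect and slicing disappear.
import Mathlib
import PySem

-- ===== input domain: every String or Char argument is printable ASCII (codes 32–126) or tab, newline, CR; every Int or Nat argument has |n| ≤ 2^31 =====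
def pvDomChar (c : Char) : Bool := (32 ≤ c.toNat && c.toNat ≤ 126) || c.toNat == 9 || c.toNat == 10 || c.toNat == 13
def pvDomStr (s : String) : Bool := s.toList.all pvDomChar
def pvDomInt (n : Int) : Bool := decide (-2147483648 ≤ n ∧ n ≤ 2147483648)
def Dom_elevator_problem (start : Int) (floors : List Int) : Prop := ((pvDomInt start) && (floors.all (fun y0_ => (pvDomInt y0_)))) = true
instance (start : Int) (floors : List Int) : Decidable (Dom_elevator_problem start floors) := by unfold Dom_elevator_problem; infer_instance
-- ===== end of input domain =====

-- B replaces sorted(set(...)) + bisect_right split/slice/reverse assembly by a recursive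
-- 3-way quicksort that dedups while sorting, run descending below start and ascending
-- above it (objective: alternative).

-- ===== PORT A =====
-- literal transliteration of A; max/min/sorted(set(...))/bisect_right via PySem;
-- the slices [:x], [x:], [::-1] are take/drop/reverse, exact here since 0 ≤ x ≤ len.
def elevator_problem (start : Int) (floors : List Int) : List Int × Int :=
  match PySem.List.max? floors (fun y => y), PySem.List.min? floors (fun y => y) with
  | some top, some bottom =>
      let unique_floors := PySem.List.sorted (PySem.Set.ofList (floors.filter (fun f => f != start))) (fun y => y) false
      let x := PySem.List.bisectRight unique_floors start
      if |start - bottom| < |top - start| then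
        (((unique_floors.take x).reverse) ++ unique_floors.drop x,
         (|start - bottom| + |top - bottom|) * 10)
      else
        ((unique_floors.drop x) ++ (unique_floors.take x).reverse,
         (|top - start| + |top - bottom|) * 10)
  | _, _ => ([], 0)   -- max([]) raises ValueError in Python: excluded by Pre_

-- ===== PORT B =====
-- termination helper for the quicksort recursions (cited by decreasing_by)
theorem pv_attach_filter_lt {xs : List Int} (hne : ¬ xs = [])
    (q : {x // x ∈ xs} → Bool)
    (hq : ∀ (h : xs.length / 2 < xs.length), q ⟨xs[xs.length / 2], List.getElem_mem h⟩ = false) :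
    (List.filter q xs.attach).unattach.length < xs.length := by
  have hpos : 0 < xs.length := List.length_pos_of_ne_nil hne
  have hlt : xs.length / 2 < xs.length := Nat.div_lt_self hpos one_lt_two
  rw [List.length_unattach]
  refine lt_of_lt_of_eq (List.length_filter_lt_length_iff_exists.mpr
    ⟨⟨xs[xs.length / 2], List.getElem_mem hlt⟩, List.mem_attach _ _, by rw [hq hlt]; simp⟩) ?_
  exact List.length_attach

-- pivot = xs[len(xs)//2]: in range for nonempty xs, so getD with default 0 is exact
def pvAsc (xs : List Int) : List Int :=
  if xs = [] then []
  else
    let p := xs.getD (xs.length / 2) 0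
    pvAsc (xs.filter (fun x => decide (x < p))) ++ p :: pvAsc (xs.filter (fun x => decide (p < x)))
termination_by xs.length
decreasing_by
  · exact pv_attach_filter_lt (by assumption) _ (fun h => by simp [List.getElem?_eq_getElem h])
  · exact pv_attach_filter_lt (by assumption) _ (fun h => by simp [List.getElem?_eq_getElem h])

def pvDesc (xs : List Int) : List Int :=
  if xs = [] then []
  else
    let p := xs.getD (xs.length / 2) 0
    pvDesc (xs.filter (fun x => decide (p < x))) ++ p :: pvDesc (xs.filter (fun x => decide (x < p)))
termination_by xs.length
decreasing_by
  · exact pv_attach_filter_lt (by assumption) _ (fun h => by simp [List.getElem?_eq_getElem h])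
  · exact pv_attach_filter_lt (by assumption) _ (fun h => by simp [List.getElem?_eq_getElem h])

def elevator_problem_alt (start : Int) (floors : List Int) : List Int × Int :=
  match PySem.List.max? floors (fun y => y) with
  | none => ([], 0)   -- max([]) raises ValueError in Python: excluded by Pre_
  | some top =>
    match PySem.List.min? floors (fun y => y) with
    | none => ([], 0)
    | some bottom =>
      let down := pvDesc (floors.filter (fun f => decide (f < start)))
      let up := pvAsc (floors.filter (fun f => decide (start < f)))
      if |start - bottom| < |top - start| then
        (down ++ up, (|start - bottom| + (top - bottom)) * 10)
      else
        (up ++ down, (|top - start| + (top - bottom)) * 10)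

-- ===== PRECONDITION & SPEC =====
-- Pre_ excludes only the empty list, on which Python's max([]) raises ValueError.
def Pre_elevator_problem (start : Int) (floors : List Int) : Prop := floors ≠ []
instance (start : Int) (floors : List Int) : Decidable (Pre_elevator_problem start floors) := by unfold Pre_elevator_problem; infer_instance
def pvWitness_elevator_problem : Int × List Int := (2, [1, 3, 2, 5])

def Spec_elevator_problem (start : Int) (floors : List Int) (out : List Int × Int) : Prop := out = elevator_problem_alt start floors
instance (start : Int) (floors : List Int) (out : List Int × Int) : Decidable (Spec_elevator_problem start floors out) := by unfold Spec_elevator_problem; infer_instance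

-- ===== CLAIM (what is proved, stated in full; the proofs are below) =====
def Claim_equal_elevator_problem : Prop := ∀ (start : Int) (floors : List Int), Dom_elevator_problem start floors → Pre_elevator_problem start floors → Spec_elevator_problem start floors (elevator_problem start floors)

-- ===== LEMMAS AND PROOFS =====

-- the pivot is an element of a nonempty list
theorem pv_pivot_mem {xs : List Int} (hne : ¬ xs = []) : xs.getD (xs.length / 2) 0 ∈ xs := by
  have hplt : xs.length / 2 < xs.length :=
    Nat.div_lt_self (List.length_pos_of_ne_nil hne) one_lt_two
  rw [List.getD_eq_getElem xs 0 hplt]; exact List.getElem_mem hplt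

theorem pv_filter_pivot_lt {xs : List Int} (hne : ¬ xs = []) (q : Int → Bool)
    (hq : q (xs.getD (xs.length / 2) 0) = false) :
    (xs.filter q).length < xs.length := by
  refine List.length_filter_lt_length_iff_exists.mpr ⟨_, pv_pivot_mem hne, ?_⟩
  rw [hq]; simp

-- membership of the quicksort results
theorem pvAsc_mem_aux : ∀ (n : Nat) (xs : List Int), xs.length ≤ n → ∀ a, (a ∈ pvAsc xs ↔ a ∈ xs) := by
  intro n
  induction n with
  | zero =>
    intro xs hlen a
    have hnil : xs = [] := List.eq_nil_of_length_eq_zero (Nat.le_zero.mp hlen)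
    subst hnil; rw [pvAsc]; simp
  | succ n ih =>
    intro xs hlen a
    by_cases hne : xs = []
    · subst hne; rw [pvAsc]; simp
    · rw [pvAsc]
      simp only [if_neg hne]
      have hlt := pv_filter_pivot_lt hne (fun x => decide (x < xs.getD (xs.length / 2) 0)) (by simp)
      have hgt := pv_filter_pivot_lt hne (fun x => decide (xs.getD (xs.length / 2) 0 < x)) (by simp)
      rw [List.mem_append, List.mem_cons, ih _ (by omega) a, ih _ (by omega) a]
      simp only [List.mem_filter, decide_eq_true_eq]
      have hpmem := pv_pivot_mem hne
      constructor
      · rintro (⟨h1, _⟩ | rfl | ⟨h1, _⟩) <;> first | exact h1 | exact hpmem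
      · intro ha
        rcases lt_trichotomy a (xs.getD (xs.length / 2) 0) with h | h | h
        · exact Or.inl ⟨ha, h⟩
        · exact Or.inr (Or.inl h)
        · exact Or.inr (Or.inr ⟨ha, h⟩)

theorem pvAsc_mem (xs : List Int) (a : Int) : a ∈ pvAsc xs ↔ a ∈ xs :=
  pvAsc_mem_aux xs.length xs le_rfl a

theorem pvDesc_mem_aux : ∀ (n : Nat) (xs : List Int), xs.length ≤ n → ∀ a, (a ∈ pvDesc xs ↔ a ∈ xs) := by
  intro n
  induction n with
  | zero =>
    intro xs hlen a
    have hnil : xs = [] := List.eq_nil_of_length_eq_zero (Nat.le_zero.mp hlen)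
    subst hnil; rw [pvDesc]; simp
  | succ n ih =>
    intro xs hlen a
    by_cases hne : xs = []
    · subst hne; rw [pvDesc]; simp
    · rw [pvDesc]
      simp only [if_neg hne]
      have hlt := pv_filter_pivot_lt hne (fun x => decide (x < xs.getD (xs.length / 2) 0)) (by simp)
      have hgt := pv_filter_pivot_lt hne (fun x => decide (xs.getD (xs.length / 2) 0 < x)) (by simp)
      rw [List.mem_append, List.mem_cons, ih _ (by omega) a, ih _ (by omega) a]
      simp only [List.mem_filter, decide_eq_true_eq]
      have hpmem := pv_pivot_mem hne
      constructor
      · rintro (⟨h1, _⟩ | rfl | ⟨h1, _⟩) <;> first | exact h1 | exact hpmem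
      · intro ha
        rcases lt_trichotomy a (xs.getD (xs.length / 2) 0) with h | h | h
        · exact Or.inr (Or.inr ⟨ha, h⟩)
        · exact Or.inr (Or.inl h)
        · exact Or.inl ⟨ha, h⟩

theorem pvDesc_mem (xs : List Int) (a : Int) : a ∈ pvDesc xs ↔ a ∈ xs :=
  pvDesc_mem_aux xs.length xs le_rfl a

-- the quicksort results are strictly ordered
theorem pvAsc_pairwise_aux : ∀ (n : Nat) (xs : List Int), xs.length ≤ n → (pvAsc xs).Pairwise (fun a b => a < b) := by
  intro n
  induction n with
  | zero =>
    intro xs hlen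
    have hnil : xs = [] := List.eq_nil_of_length_eq_zero (Nat.le_zero.mp hlen)
    subst hnil; rw [pvAsc]; simp
  | succ n ih =>
    intro xs hlen
    by_cases hne : xs = []
    · subst hne; rw [pvAsc]; simp
    · rw [pvAsc]
      simp only [if_neg hne]
      have hlt := pv_filter_pivot_lt hne (fun x => decide (x < xs.getD (xs.length / 2) 0)) (by simp)
      have hgt := pv_filter_pivot_lt hne (fun x => decide (xs.getD (xs.length / 2) 0 < x)) (by simp)
      rw [List.pairwise_append]
      refine ⟨ih _ (by omega), ?_, ?_⟩
      · rw [List.pairwise_cons]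
        refine ⟨?_, ih _ (by omega)⟩
        intro b hb
        have := (pvAsc_mem _ b).mp hb
        simp only [List.mem_filter, decide_eq_true_eq] at this
        exact this.2
      · intro a ha b hb
        have h1 := (pvAsc_mem _ a).mp ha
        simp only [List.mem_filter, decide_eq_true_eq] at h1
        rcases List.mem_cons.mp hb with rfl | hb'
        · exact h1.2
        · have h2 := (pvAsc_mem _ b).mp hb'
          simp only [List.mem_filter, decide_eq_true_eq] at h2
          omega

theorem pvAsc_pairwise (xs : List Int) : (pvAsc xs).Pairwise (fun a b => a < b) :=
  pvAsc_pairwise_aux xs.length xs le_rfl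

theorem pvDesc_pairwise_aux : ∀ (n : Nat) (xs : List Int), xs.length ≤ n → (pvDesc xs).Pairwise (fun a b => b < a) := by
  intro n
  induction n with
  | zero =>
    intro xs hlen
    have hnil : xs = [] := List.eq_nil_of_length_eq_zero (Nat.le_zero.mp hlen)
    subst hnil; rw [pvDesc]; simp
  | succ n ih =>
    intro xs hlen
    by_cases hne : xs = []
    · subst hne; rw [pvDesc]; simp
    · rw [pvDesc]
      simp only [if_neg hne]
      have hlt := pv_filter_pivot_lt hne (fun x => decide (x < xs.getD (xs.length / 2) 0)) (by simp)
      have hgt := pv_filter_pivot_lt hne (fun x => decide (xs.getD (xs.length / 2) 0 < x)) (by simp)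
      rw [List.pairwise_append]
      refine ⟨ih _ (by omega), ?_, ?_⟩
      · rw [List.pairwise_cons]
        refine ⟨?_, ih _ (by omega)⟩
        intro b hb
        have := (pvDesc_mem _ b).mp hb
        simp only [List.mem_filter, decide_eq_true_eq] at this
        exact this.2
      · intro a ha b hb
        have h1 := (pvDesc_mem _ a).mp ha
        simp only [List.mem_filter, decide_eq_true_eq] at h1
        rcases List.mem_cons.mp hb with rfl | hb'
        · exact h1.2
        · have h2 := (pvDesc_mem _ b).mp hb'
          simp only [List.mem_filter, decide_eq_true_eq] at h2
          omega

theorem pvDesc_pairwise (xs : List Int) : (pvDesc xs).Pairwise (fun a b => b < a) :=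
  pvDesc_pairwise_aux xs.length xs le_rfl

theorem pvAsc_nodup (xs : List Int) : (pvAsc xs).Nodup :=
  (pvAsc_pairwise xs).imp (fun h => ne_of_lt h)

theorem pvDesc_nodup (xs : List Int) : (pvDesc xs).Nodup :=
  (pvDesc_pairwise xs).imp (fun h => ne_of_gt h)

-- the quicksort results ARE the sorted unique lists (m : any nodup list with the same members)
theorem pvAsc_eq (l m : List Int) (hm : m.Nodup) (hmem : ∀ a, a ∈ m ↔ a ∈ l) :
    PySem.List.sorted m (fun y => y) false = pvAsc l := by
  apply PySem.List.sorted_eq_of_perm_of_pairwise_lt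
  · rw [List.perm_ext_iff_of_nodup (pvAsc_nodup l) hm]
    intro a; rw [pvAsc_mem, hmem]
  · exact pvAsc_pairwise l

theorem pvDesc_eq (l m : List Int) (hm : m.Nodup) (hmem : ∀ a, a ∈ m ↔ a ∈ l) :
    PySem.List.sorted m (fun y => y) true = pvDesc l := by
  apply PySem.List.sorted_rev_eq_of_perm_of_pairwise_gt
  · rw [List.perm_ext_iff_of_nodup (pvDesc_nodup l) hm]
    intro a; rw [pvDesc_mem, hmem]
  · exact pvDesc_pairwise l

-- strict pairwise from nodup + weak pairwise
theorem pv_pairwise_lt_of_nodup {l : List Int}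
    (hle : l.Pairwise (fun a b => a ≤ b)) (hnd : l.Nodup) :
    l.Pairwise (fun a b => a < b) :=
  (hle.and hnd).imp (fun h => lt_of_le_of_ne h.1 h.2)

theorem pv_pairwise_gt_of_nodup {l : List Int}
    (hge : l.Pairwise (fun a b => b ≤ a)) (hnd : l.Nodup) :
    l.Pairwise (fun a b => b < a) :=
  (hge.and hnd).imp (fun h => lt_of_le_of_ne h.1 (Ne.symm h.2))

-- membership in the sorted partition lists
theorem pv_mem_below {start : Int} {floors : List Int} {a : Int} :
    a ∈ PySem.List.sorted ((PySem.Set.ofList floors).filter (fun f => decide (f < start))) (fun y => y) true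
      ↔ a ∈ floors ∧ a < start := by
  rw [PySem.List.mem_sorted, List.mem_filter]
  simp [PySem.Set.mem_ofList]

theorem pv_mem_above {start : Int} {floors : List Int} {a : Int} :
    a ∈ PySem.List.sorted ((PySem.Set.ofList floors).filter (fun f => decide (start < f))) (fun y => y) false
      ↔ a ∈ floors ∧ start < a := by
  rw [PySem.List.mem_sorted, List.mem_filter]
  simp [PySem.Set.mem_ofList]

theorem pv_nodup_below (start : Int) (floors : List Int) :
    (PySem.List.sorted ((PySem.Set.ofList floors).filter (fun f => decide (f < start))) (fun y => y) true).Nodup :=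
  (PySem.List.sorted_perm _ _ _).nodup_iff.mpr ((PySem.Set.nodup_ofList floors).filter _)

theorem pv_nodup_above (start : Int) (floors : List Int) :
    (PySem.List.sorted ((PySem.Set.ofList floors).filter (fun f => decide (start < f))) (fun y => y) false).Nodup :=
  (PySem.List.sorted_perm _ _ _).nodup_iff.mpr ((PySem.Set.nodup_ofList floors).filter _)

-- A's sorted unique list splits into the descending-below part reversed and the ascending-above part
theorem pv_split (start : Int) (floors : List Int) :
    PySem.List.sorted (PySem.Set.ofList (floors.filter (fun f => f != start))) (fun y => y) false
      = (PySem.List.sorted ((PySem.Set.ofList floors).filter (fun f => decide (f < start))) (fun y => y) true).reverse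
        ++ PySem.List.sorted ((PySem.Set.ofList floors).filter (fun f => decide (start < f))) (fun y => y) false := by
  set B := PySem.List.sorted ((PySem.Set.ofList floors).filter (fun f => decide (f < start))) (fun y => y) true with hB
  set A := PySem.List.sorted ((PySem.Set.ofList floors).filter (fun f => decide (start < f))) (fun y => y) false with hA
  apply PySem.List.sorted_eq_of_perm_of_pairwise_lt
  · -- permutation
    rw [List.perm_ext_iff_of_nodup]
    · intro a
      rw [List.mem_append, List.mem_reverse, hB, hA, pv_mem_below, pv_mem_above,
          PySem.Set.mem_ofList, List.mem_filter]
      simp only [bne_iff_ne]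
      constructor
      · rintro (⟨h1, h2⟩ | ⟨h1, h2⟩) <;> exact ⟨h1, by omega⟩
      · rintro ⟨h1, h2⟩
        rcases lt_or_gt_of_ne h2 with h | h
        · exact Or.inl ⟨h1, h⟩
        · exact Or.inr ⟨h1, h⟩
    · apply List.Nodup.append
      · exact List.nodup_reverse.mpr (pv_nodup_below start floors)
      · exact pv_nodup_above start floors
      · intro a haB haA
        have h1 := (pv_mem_below (start := start) (floors := floors)).mp (List.mem_reverse.mp haB)
        have h2 := (pv_mem_above (start := start) (floors := floors)).mp haA
        omega
    · exact PySem.Set.nodup_ofList _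
  · -- strictly increasing
    rw [List.pairwise_append]
    refine ⟨?_, ?_, ?_⟩
    · rw [List.pairwise_reverse]
      exact pv_pairwise_gt_of_nodup (hB ▸ PySem.List.sorted_pairwise_rev _ _) (pv_nodup_below start floors)
    · exact pv_pairwise_lt_of_nodup (hA ▸ PySem.List.sorted_pairwise _ _) (pv_nodup_above start floors)
    · intro a haB b hbA
      have h1 := (pv_mem_below (start := start) (floors := floors)).mp (List.mem_reverse.mp haB)
      have h2 := (pv_mem_above (start := start) (floors := floors)).mp hbA
      omega

-- the bisect point is the length of the reversed 'below' part
theorem pv_bisect (start : Int) (floors : List Int) :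
    PySem.List.bisectRight
      (PySem.List.sorted (PySem.Set.ofList (floors.filter (fun f => f != start))) (fun y => y) false) start
      = (PySem.List.sorted ((PySem.Set.ofList floors).filter (fun f => decide (f < start))) (fun y => y) true).length := by
  have hle : (PySem.List.sorted (PySem.Set.ofList (floors.filter (fun f => f != start))) (fun y => y) false).Pairwise (fun a b : Int => a ≤ b) :=
    PySem.List.sorted_pairwise _ _
  have hsplit := pv_split start floors
  rw [hsplit] at hle ⊢
  set P := (PySem.List.sorted ((PySem.Set.ofList floors).filter (fun f => decide (f < start))) (fun y => y) true).reverse with hP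
  set A := PySem.List.sorted ((PySem.Set.ofList floors).filter (fun f => decide (start < f))) (fun y => y) false with hA
  obtain ⟨hx1, hx2, hx3⟩ := PySem.List.bisectRight_spec (P ++ A) start hle
  set x := PySem.List.bisectRight (P ++ A) start with hx
  have hlen : (P ++ A).length = P.length + A.length := List.length_append
  suffices hxP : x = P.length by rw [hxP, hP, List.length_reverse]
  by_contra hne
  rcases Nat.lt_or_ge x P.length with h | h
  · -- x < P.length: the element at x lies in P so it is < start, but the spec says start < it
    have hxU : x < (P ++ A).length := by omega
    have hmem : (P ++ A)[x] ∈ P := by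
      rw [List.getElem_append_left h]; exact List.getElem_mem _
    have : (P ++ A)[x] < start :=
      ((pv_mem_below (start := start) (floors := floors)).mp (List.mem_reverse.mp (hP ▸ hmem))).2
    have := hx3 x hxU (le_refl x)
    omega
  · -- P.length < x: the element at P.length lies in A so start < it, but the spec says it ≤ start
    have hlt : P.length < x := lt_of_le_of_ne h (fun h' => hne h'.symm)
    have hPU : P.length < (P ++ A).length := by omega
    have hmem : (P ++ A)[P.length] ∈ A := by
      rw [List.getElem_append_right (le_refl P.length)]; exact List.getElem_mem _
    have : start < (P ++ A)[P.length] :=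
      ((pv_mem_above (start := start) (floors := floors)).mp (hA ▸ hmem)).2
    have := hx2 P.length hPU hlt
    omega

-- ===== VERDICT (by name: the statement is the Claim_ definition above) =====
theorem elevator_problem_spec : Claim_equal_elevator_problem := by
  intro start floors _ hpre
  unfold Spec_elevator_problem
  obtain ⟨f, t, rfl⟩ : ∃ f t, floors = f :: t := by
    cases floors with
    | nil => exact absurd rfl hpre
    | cons f t => exact ⟨f, t, rfl⟩
  unfold elevator_problem elevator_problem_alt
  rw [PySem.List.max?_id_cons, PySem.List.min?_id_cons]
  simp only []
  set top := List.foldl max f t with htop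
  set bottom := List.foldl min f t with hbot
  have hbt : bottom ≤ top := by
    have h1 : PySem.List.max? (f :: t) (fun y => y) = some top := by
      rw [PySem.List.max?_id_cons]
    have h2 : PySem.List.min? (f :: t) (fun y => y) = some bottom := by
      rw [PySem.List.min?_id_cons]
    exact PySem.List.max?_isMax h1 bottom (PySem.List.min?_mem h2)
  have habs : |top - bottom| = top - bottom := abs_of_nonneg (by omega)
  set B := PySem.List.sorted ((PySem.Set.ofList (f :: t)).filter (fun f' => decide (f' < start))) (fun y => y) true with hB
  set A := PySem.List.sorted ((PySem.Set.ofList (f :: t)).filter (fun f' => decide (start < f'))) (fun y => y) false with hA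
  have hdown : B = pvDesc ((f :: t).filter (fun f' => decide (f' < start))) := by
    rw [hB]
    apply pvDesc_eq
    · exact (PySem.Set.nodup_ofList _).filter _
    · intro a
      simp [List.mem_filter, PySem.Set.mem_ofList]
  have hup : A = pvAsc ((f :: t).filter (fun f' => decide (start < f'))) := by
    rw [hA]
    apply pvAsc_eq
    · exact (PySem.Set.nodup_ofList _).filter _
    · intro a
      simp [List.mem_filter, PySem.Set.mem_ofList]
  have hsplit := pv_split start (f :: t)
  have hbis := pv_bisect start (f :: t)
  rw [hbis, hsplit, ← List.length_reverse (as := B), List.take_left, List.drop_left,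
      List.reverse_reverse, ← hdown, ← hup]
  split_ifs with h
  · rw [habs]
  · rw [habs]
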